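-- pv_equiv track=rewrite | github.com/nobuhiro0202/leetcode_practice | 2389.py | answerQueries
-- ===== SOURCE A (Python) =====
-- from typing import List
--
-- from bisect import bisect_left
--
-- def answerQueries(nums: List[int], queries: List[int]) -> List[int]:
--   nums.sort()
--   n = len(nums)
--   s = [0] * (n + 1)
--   for i in range(n): s[i + 1] = s[i] + nums[i]
--   ans = []
--   for q in queries:
--     p = bisect_left(s, q)
--     if (p == n + 1) or (s[p] > q): p -= 1
--     ans.append(p)
--   return ans
-- ===== SOURCE B (Python) =====
-- def answerQueries(nums, queries):
--     nums.sort()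
--     s = [0]
--     for x in nums:
--         s.append(s[-1] + x)
--     n1 = len(s)
--     ans = [0] * len(queries)
--     # offline batched binary search: one divide-and-conquer over [lo, hi) intervals,
--     # partitioning the whole query set at each midpoint (same decision tree as
--     # bisect_left, but all queries descend it together)
--     stack = [(0, n1, list(range(len(queries))))]
--     while stack:
--         lo, hi, idxs = stack.pop()
--         if lo >= hi:
--             for i in idxs:
--                 ans[i] = lo - 1 if lo == n1 or s[lo] > queries[i] else lo
--             continue
--         mid = (lo + hi) // 2
--         left = []
--         right = []
--         for i in idxs:
--             if s[mid] < queries[i]: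
--                 right.append(i)
--             else:
--                 left.append(i)
--         stack.append((mid + 1, hi, right))
--         stack.append((lo, mid, left))
--     return ans
-- ===== Notes on version B (the rewrite author's own statement) =====
-- stated objective: alternative
-- what changed: B replaces A's m independent bisect_left binary searches over the prefix-sum array by one offline batched divide-and-conquer: an explicit work stack of ([lo,hi) interval, query-index set) pairs descends the same midpoint decision tree once for all queries together, partitioning the query set at each midpoint and writing answers back by original index.
import Mathlib
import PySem

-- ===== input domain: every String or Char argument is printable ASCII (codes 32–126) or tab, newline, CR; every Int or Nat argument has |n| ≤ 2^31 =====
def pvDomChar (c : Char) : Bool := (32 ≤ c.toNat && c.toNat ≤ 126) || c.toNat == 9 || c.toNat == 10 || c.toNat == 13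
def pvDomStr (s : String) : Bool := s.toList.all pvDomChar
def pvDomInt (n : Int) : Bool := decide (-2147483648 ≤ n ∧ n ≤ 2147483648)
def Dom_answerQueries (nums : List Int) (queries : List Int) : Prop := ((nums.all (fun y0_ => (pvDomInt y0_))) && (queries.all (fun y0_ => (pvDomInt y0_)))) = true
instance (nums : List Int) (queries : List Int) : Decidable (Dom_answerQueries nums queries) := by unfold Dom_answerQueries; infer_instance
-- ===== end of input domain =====

-- B replaces A's m independent bisect_left binary searches with one offline batched
-- divide-and-conquer: all queries descend the same midpoint decision tree together
-- (alternative decomposition, similar cost). Both A and B sort `nums` in place in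
-- Python; the equivalence proved here is about the return value (the ports are pure).

-- ===== PORT A =====
def answerQueries (nums : List Int) (queries : List Int) : List Int :=
  let nums := PySem.List.sorted nums (fun x => x) false   -- nums.sort()
  let n : Int := PySem.List.len nums
  let s0 : List Int := PySem.List.pyRepeat [0] (n + 1)    -- s = [0] * (n + 1)
  -- for i in range(n): s[i + 1] = s[i] + nums[i]   (indices are always in range; List.set
  -- at (i+1).toNat is exact here since 0 ≤ i < n)
  let s := (PySem.List.pyRange 0 n 1).foldl
    (fun s i => s.set (i + 1).toNat (PySem.List.pyGetD s i 0 + PySem.List.pyGetD nums i 0)) s0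
  -- for q in queries: p = bisect_left(s, q); if (p == n + 1) or (s[p] > q): p -= 1; ans.append(p)
  -- (s[p] is only evaluated when p ≠ n + 1, hence in range: pyGetD's default is unreachable)
  queries.foldl
    (fun ans q =>
      let p : Int := (PySem.List.bisectLeft s q : Nat)
      let p := if p == n + 1 || PySem.List.pyGetD s p 0 > q then p - 1 else p
      ans ++ [p]) []

-- ===== PORT B =====
-- termination measure for the explicit work stack (each split strictly shrinks it)
def pvM (st : List (Nat × Nat × List Nat)) : Nat :=
  (st.map (fun e => 2 * (e.2.1 - e.1) + 1)).sum

-- the `while stack:` loop of Source B; the stack's top is the list head (Python appends and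
-- pops at the same end, so push order right-then-left = process left first, as here).
-- lo/hi/mid and the stored query indices are nonnegative Python ints: ported as Nat,
-- where (lo + hi) / 2 is exactly Python's (lo + hi) // 2; s[lo] is only evaluated when
-- lo ≠ n1, hence in range, and s[mid]/queries[i] are always in range (pyGetD is exact)
def pvSolve (s : List Int) (queries : List Int) (n1 : Nat) :
    List (Nat × Nat × List Nat) → List Int → List Int
  | [], ans => ans
  | (lo, hi, idxs) :: stack, ans =>
    if lo ≥ hi then
      -- for i in idxs: q = queries[i]; ans[i] = lo - 1 if lo == n1 or s[lo] > q else lo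
      pvSolve s queries n1 stack
        (idxs.foldl (fun (a : List Int) (i : Nat) =>
          a.set i (if lo == n1 || PySem.List.pyGetD s (lo : Int) 0 > PySem.List.pyGetD queries (i : Int) 0
            then (lo : Int) - 1 else (lo : Int))) ans)
    else
      -- mid = (lo + hi) // 2, written out below
      -- for i in idxs: if s[mid] < queries[i]: right.append(i) else: left.append(i)
      -- stack.append((mid + 1, hi, right)); stack.append((lo, mid, left))
      pvSolve s queries n1
        ((lo, (lo + hi) / 2,
           (idxs.foldl (fun (lr : List Nat × List Nat) (i : Nat) =>
             if PySem.List.pyGetD s (((lo + hi) / 2 : Nat) : Int) 0 < PySem.List.pyGetD queries (i : Int) 0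
             then (lr.1, lr.2 ++ [i]) else (lr.1 ++ [i], lr.2)) (([], []) : List Nat × List Nat)).1) ::
         ((lo + hi) / 2 + 1, hi,
           (idxs.foldl (fun (lr : List Nat × List Nat) (i : Nat) =>
             if PySem.List.pyGetD s (((lo + hi) / 2 : Nat) : Int) 0 < PySem.List.pyGetD queries (i : Int) 0
             then (lr.1, lr.2 ++ [i]) else (lr.1 ++ [i], lr.2)) (([], []) : List Nat × List Nat)).2) ::
         stack) ans
termination_by st _ => pvM st
decreasing_by all_goals (simp [pvM]; try omega)

def answerQueries_alt (nums : List Int) (queries : List Int) : List Int :=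
  let m := PySem.List.sorted nums (fun x => x) false      -- nums.sort()
  let s := m.foldl (fun s x => s ++ [PySem.List.pyGetD s (-1) 0 + x]) [0]   -- s.append(s[-1] + x)
  let n1 := s.length                                      -- n1 = len(s)
  -- ans = [0] * len(queries); stack = [(0, n1, list(range(len(queries))))]
  pvSolve s queries n1 [(0, n1, List.range queries.length)]
    (PySem.List.pyRepeat [0] (PySem.List.len queries))

-- ===== PRECONDITION & SPEC =====
def Spec_answerQueries (nums : List Int) (queries : List Int) (out : List Int) : Prop :=
  out = answerQueries_alt nums queries
instance (nums : List Int) (queries : List Int) (out : List Int) :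
    Decidable (Spec_answerQueries nums queries out) := by
  unfold Spec_answerQueries; infer_instance

-- ===== CLAIM (what is proved, stated in full; the proofs are below) =====
def Claim_equal_answerQueries : Prop :=
  ∀ (nums : List Int) (queries : List Int), Dom_answerQueries nums queries →
    Spec_answerQueries nums queries (answerQueries nums queries)

-- ===== LEMMAS AND PROOFS =====

-- reference prefix-sum list: pvPfx m t = [t, t+m0, t+m0+m1, …]
def pvPfx : List Int → Int → List Int
  | [], t => [t]
  | x :: xs, t => t :: pvPfx xs (t + x)

theorem pvPfx_length (ms : List Int) (t : Int) : (pvPfx ms t).length = ms.length + 1 := by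
  induction ms generalizing t with
  | nil => rfl
  | cons x xs ih => simp [pvPfx, ih]

theorem pvPfx_append (ms : List Int) (x t : Int) :
    pvPfx (ms ++ [x]) t = pvPfx ms t ++ [t + ms.sum + x] := by
  induction ms generalizing t with
  | nil => simp [pvPfx]
  | cons y ys ih => simp [pvPfx, ih]; ring_nf

theorem pvPfx_getElem_last (ms : List Int) (t : Int) :
    (pvPfx ms t)[ms.length]'(by simp [pvPfx_length]) = t + ms.sum := by
  induction ms generalizing t with
  | nil => simp [pvPfx]
  | cons x xs ih => simp [pvPfx, ih (t + x)]; ring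

theorem pvPfx_getElem_of_eq (ms : List Int) (t : Int) (j : Nat) (hj : j = ms.length)
    (h : j < (pvPfx ms t).length) : (pvPfx ms t)[j] = t + ms.sum := by
  subst hj; exact pvPfx_getElem_last ms t

-- B's prefix construction builds pvPfx
theorem pv_buildB (ms : List Int) : ∀ (pre : List Int) (t : Int),
    (ms.foldl (fun s x => s ++ [PySem.List.pyGetD s (-1) 0 + x]) (pre ++ [t]))
      = pre ++ pvPfx ms t := by
  induction ms with
  | nil => intro pre t; simp [pvPfx]
  | cons x xs ih =>
    intro pre t
    simp only [List.foldl_cons, pvPfx]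
    have hlast : PySem.List.pyGetD (pre ++ [t]) (-1) 0 = t := by
      simp [PySem.List.pyGetD, PySem.List.pyGet?, PySem.List.pyIdx?]
    rw [hlast]
    have : pre ++ [t] ++ [t + x] = (pre ++ [t]) ++ [t + x] := by simp
    rw [this, ih (pre ++ [t]) (t + x)]
    simp

theorem pv_buildB0 (ms : List Int) :
    ms.foldl (fun s x => s ++ [PySem.List.pyGetD s (-1) 0 + x]) [0] = pvPfx ms 0 := by
  simpa using pv_buildB ms [] 0

-- A's prefix construction builds pvPfx
theorem pv_buildA (m : List Int) :
    (PySem.List.pyRange 0 (PySem.List.len m) 1).foldl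
      (fun s i => s.set (i + 1).toNat (PySem.List.pyGetD s i 0 + PySem.List.pyGetD m i 0))
      (PySem.List.pyRepeat [0] (PySem.List.len m + 1)) = pvPfx m 0 := by
  have aux : ∀ (d k : Nat), m.length - k = d → k ≤ m.length →
      (PySem.List.pyRange (k : Int) (m.length : Int) 1).foldl
        (fun s i => s.set (i + 1).toNat (PySem.List.pyGetD s i 0 + PySem.List.pyGetD m i 0))
        (pvPfx (m.take k) 0 ++ List.replicate (m.length - k) 0) = pvPfx m 0 := by
    intro d
    induction d with
    | zero =>
      intro k hd hk
      have hkm : k = m.length := by omega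
      subst hkm
      rw [PySem.List.pyRange_one_eq_nil (le_refl _)]
      simp
    | succ d ih =>
      intro k hd hk
      have hklt : k < m.length := by omega
      have htklen : (m.take k).length = k := by simp [List.length_take]; omega
      have hlenpfx : (pvPfx (m.take k) 0).length = k + 1 := by
        rw [pvPfx_length, htklen]
      rw [PySem.List.pyRange_one_cons (by exact_mod_cast hklt)]
      simp only [List.foldl_cons]
      have hidx : ((k : Int) + 1).toNat = k + 1 := by omega
      have hgets : PySem.List.pyGetD (pvPfx (m.take k) 0 ++ List.replicate (m.length - k) 0) (k : Int) 0
          = 0 + (m.take k).sum := by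
        rw [PySem.List.pyGetD_natCast]
        rw [List.getD_eq_getElem _ _ (by simp [hlenpfx]; omega)]
        rw [List.getElem_append_left (by omega)]
        exact pvPfx_getElem_of_eq (m.take k) 0 k htklen.symm _
      have hgetm : PySem.List.pyGetD m (k : Int) 0 = m[k] := by
        rw [PySem.List.pyGetD_natCast, List.getD_eq_getElem _ _ hklt]
      have hrepl : List.replicate (m.length - k) (0 : Int)
          = 0 :: List.replicate (m.length - (k + 1)) 0 := by
        rw [show m.length - k = (m.length - (k + 1)) + 1 by omega, List.replicate_succ]
      have hset : (pvPfx (m.take k) 0 ++ List.replicate (m.length - k) 0).set (k + 1)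
            (0 + (m.take k).sum + m[k])
          = pvPfx (m.take (k + 1)) 0 ++ List.replicate (m.length - (k + 1)) 0 := by
        rw [List.set_append, if_neg (by omega), hlenpfx, Nat.sub_self, hrepl,
          List.set_cons_zero]
        have htsucc : m.take (k + 1) = m.take k ++ [m[k]] := by
          rw [List.take_add_one]
          simp [List.getElem?_eq_getElem hklt]
        rw [htsucc, pvPfx_append]
        simp
      rw [hidx, hgets, hgetm, hset]
      have hcast : (k : Int) + 1 = ((k + 1 : Nat) : Int) := by push_cast; ring
      rw [hcast]
      exact ih (k + 1) (by omega) (by omega)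
  rw [PySem.List.len_eq, PySem.List.pyRepeat_singleton]
  have := aux m.length 0 (by omega) (by omega)
  simpa [List.replicate_succ] using this

-- the pure decision-tree form of CPython's bisect_left loop, on any array
def pvBis (s : List Int) (q : Int) (lo hi : Nat) : Nat :=
  if h : lo < hi then
    if PySem.List.pyGetD s (((lo + hi) / 2 : Nat) : Int) 0 < q then pvBis s q ((lo + hi) / 2 + 1) hi
    else pvBis s q lo ((lo + hi) / 2)
  else lo
termination_by hi - lo
decreasing_by all_goals omega

theorem pv_loop_eq (s : List Int) (q : Int) :
    ∀ (fuel lo hi : Nat), hi ≤ s.length → hi - lo ≤ fuel →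
    PySem.List.bisectLeftLoop s q fuel lo hi = pvBis s q lo hi := by
  intro fuel
  induction fuel with
  | zero =>
    intro lo hi hhi hf
    rw [pvBis, dif_neg (by omega)]
    conv_lhs => rw [PySem.List.bisectLeftLoop]
  | succ fuel ih =>
    intro lo hi hhi hf
    by_cases hlt : lo < hi
    · have hmid : (lo + hi) / 2 < s.length := by omega
      have hget : PySem.List.pyGetD s (((lo + hi) / 2 : Nat) : Int) 0 = s[(lo + hi) / 2] := by
        rw [PySem.List.pyGetD_natCast, List.getD_eq_getElem _ _ hmid]
      have hloop : PySem.List.bisectLeftLoop s q (fuel + 1) lo hi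
          = if s[(lo + hi) / 2] < q
            then PySem.List.bisectLeftLoop s q fuel ((lo + hi) / 2 + 1) hi
            else PySem.List.bisectLeftLoop s q fuel lo ((lo + hi) / 2) := by
        conv_lhs => rw [PySem.List.bisectLeftLoop]
        rw [if_pos hlt, List.getElem?_eq_getElem hmid]
      rw [hloop, pvBis, dif_pos hlt, hget]
      by_cases hc : s[(lo + hi) / 2] < q
      · rw [if_pos hc, if_pos hc]; exact ih _ _ hhi (by omega)
      · rw [if_neg hc, if_neg hc]; exact ih _ _ (by omega) (by omega)
    · rw [pvBis, dif_neg hlt]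
      conv_lhs => rw [PySem.List.bisectLeftLoop]
      rw [if_neg hlt]

theorem pv_bisect_eq_pvBis (s : List Int) (q : Int) :
    PySem.List.bisectLeft s q = pvBis s q 0 s.length := by
  unfold PySem.List.bisectLeft
  exact pv_loop_eq s q s.length 0 s.length (le_refl _) (by omega)

theorem pvM_cons (a b : Nat) (l : List Nat) (st : List (Nat × Nat × List Nat)) :
    pvM ((a, b, l) :: st) = 2 * (b - a) + 1 + pvM st := by
  simp [pvM]

-- the value both programs record for a query answered with boundary p
def pvV (s : List Int) (n1 : Nat) (p : Nat) (q : Int) : Int :=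
  if p == n1 || PySem.List.pyGetD s (p : Int) 0 > q then (p : Int) - 1 else (p : Int)

-- A's per-query expression is pvV at the bisect boundary
theorem pv_fA_eq (s : List Int) (n : Int) (hn : (s.length : Int) = n + 1) (q : Int) :
    (if ((PySem.List.bisectLeft s q : Int)) == n + 1
        || PySem.List.pyGetD s (PySem.List.bisectLeft s q : Int) 0 > q
      then (PySem.List.bisectLeft s q : Int) - 1
      else (PySem.List.bisectLeft s q : Int))
    = pvV s s.length (PySem.List.bisectLeft s q) q := by
  unfold pvV
  have hbeq : ((PySem.List.bisectLeft s q : Int) == n + 1)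
      = (PySem.List.bisectLeft s q == s.length) := by
    by_cases h : PySem.List.bisectLeft s q = s.length
    · simp [h, hn]
    · have : ¬ ((PySem.List.bisectLeft s q : Int) = n + 1) := by
        rw [← hn]; exact_mod_cast h
      simp [h, this]
  rw [hbeq]

-- scatter: a fold writing a value that depends only on the index, read back
theorem pv_scatter_get (W : Nat → Int) : ∀ (l : List Nat) (ans : List Int) (j : Nat),
    (l.foldl (fun a i => a.set i (W i)) ans)[j]?
      = if j ∈ l ∧ j < ans.length then some (W j) else ans[j]? := by
  intro l
  induction l with
  | nil => intro ans j; simp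
  | cons i l ih =>
    intro ans j
    simp only [List.foldl_cons]
    rw [ih (ans.set i (W i)) j]
    by_cases hmem : j ∈ l
    · simp only [hmem, List.length_set, true_and, List.mem_cons, or_true]
      by_cases hlen : j < ans.length
      · simp [hlen]
      · have h1 : ans[j]? = none := by
          rw [List.getElem?_eq_none]; omega
        have h2 : (ans.set i (W i))[j]? = none := by
          rw [List.getElem?_eq_none]; simp; omega
        simp [hlen]
    · by_cases hij : j = i
      · subst hij
        simp [hmem, List.getElem?_set]
        by_cases hlen : j < ans.length
        · simp [hlen]
        · simp [hlen]
      · simp [hmem, List.length_set, Ne.symm hij, hij]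

theorem pv_scatter_len (W : Nat → Int) : ∀ (l : List Nat) (ans : List Int),
    (l.foldl (fun a i => a.set i (W i)) ans).length = ans.length := by
  intro l
  induction l with
  | nil => intro ans; rfl
  | cons i l ih => intro ans; simp [List.foldl_cons, ih]

theorem pvSolve_len (s queries : List Int) (n1 : Nat) :
    ∀ (d : Nat) (st : List (Nat × Nat × List Nat)) (ans : List Int), pvM st ≤ d →
    (pvSolve s queries n1 st ans).length = ans.length := by
  intro d
  induction d with
  | zero =>
    intro st ans hm
    match st with
    | [] => rw [pvSolve]
    | (lo, hi, idxs) :: stack => simp [pvM] at hm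
  | succ d ih =>
    intro st ans hm
    match st with
    | [] => rw [pvSolve]
    | (lo, hi, idxs) :: stack =>
      by_cases hlh : lo ≥ hi
      · rw [pvSolve, if_pos hlh, ih _ _ (by rw [pvM_cons] at hm; omega)]
        exact pv_scatter_len _ idxs ans
      · rw [pvSolve, if_neg hlh]
        refine ih _ _ ?_
        rw [pvM_cons] at hm
        rw [pvM_cons, pvM_cons]
        omega

theorem pvSolve_append (s queries : List Int) (n1 : Nat) :
    ∀ (d : Nat) (a b : List (Nat × Nat × List Nat)) (ans : List Int), pvM a ≤ d →
    pvSolve s queries n1 (a ++ b) ans = pvSolve s queries n1 b (pvSolve s queries n1 a ans) := by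
  intro d
  induction d with
  | zero =>
    intro a b ans hm
    match a with
    | [] => rw [List.nil_append]; conv_rhs => rw [pvSolve]
    | (lo, hi, idxs) :: stack => simp [pvM] at hm
  | succ d ih =>
    intro a b ans hm
    match a with
    | [] => rw [List.nil_append]; conv_rhs => rw [pvSolve]
    | (lo, hi, idxs) :: stack =>
      by_cases hlh : lo ≥ hi
      · rw [List.cons_append]
        conv_lhs => rw [pvSolve, if_pos hlh]
        conv_rhs => rw [pvSolve, if_pos hlh]
        exact ih _ _ _ (by rw [pvM_cons] at hm; omega)
      · rw [List.cons_append]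
        conv_lhs => rw [pvSolve, if_neg hlh]
        conv_rhs => rw [pvSolve, if_neg hlh]
        rw [← List.cons_append, ← List.cons_append]
        refine ih _ _ _ ?_
        rw [pvM_cons] at hm
        rw [pvM_cons, pvM_cons]
        omega

-- the partition loop is a pair of filters
theorem pv_partition (c : Nat → Bool) (idxs : List Nat) :
    idxs.foldl (fun lr i => if c i then (lr.1, lr.2 ++ [i]) else (lr.1 ++ [i], lr.2))
        (([], []) : List Nat × List Nat)
      = (idxs.filter (fun i => ! c i), idxs.filter c) := by
  have hfe : (fun (lr : List Nat × List Nat) i =>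
        if c i then (lr.1, lr.2 ++ [i]) else (lr.1 ++ [i], lr.2))
      = fun lr i => ((fun a i => if ! c i then a ++ [i] else a) lr.1 i,
                     (fun a i => if c i then a ++ [i] else a) lr.2 i) := by
    funext lr i
    by_cases h : c i <;> simp [h]
  rw [hfe, PySem.List.foldl_prod_mk (f := fun a i => if ! c i then a ++ [i] else a)
    (g := fun a i => if c i then a ++ [i] else a)]
  rw [PySem.List.foldl_append_if_eq_filter, PySem.List.foldl_append_if_eq_filter]
  simp

-- one stack entry assigns pvV at the pvBis boundary to exactly its index set
theorem pvSolve_one_get (s queries : List Int) (n1 : Nat) :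
    ∀ (d lo hi : Nat), hi - lo ≤ d → hi ≤ s.length →
    ∀ (idxs : List Nat) (ans : List Int) (j : Nat),
    (pvSolve s queries n1 [(lo, hi, idxs)] ans)[j]?
      = if j ∈ idxs ∧ j < ans.length
        then some (pvV s n1 (pvBis s (PySem.List.pyGetD queries (j : Int) 0) lo hi)
          (PySem.List.pyGetD queries (j : Int) 0))
        else ans[j]? := by
  intro d
  induction d with
  | zero =>
    intro lo hi hd hhi idxs ans j
    have hlh : lo ≥ hi := by omega
    rw [pvSolve, if_pos hlh, pvSolve]
    rw [pv_scatter_get (fun i => if lo == n1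
        || PySem.List.pyGetD s (lo : Int) 0 > PySem.List.pyGetD queries (i : Int) 0
      then (lo : Int) - 1 else (lo : Int)) idxs ans j]
    by_cases hj : j ∈ idxs ∧ j < ans.length
    · rw [if_pos hj, if_pos hj]
      rw [pvBis, dif_neg (by omega)]
      rfl
    · rw [if_neg hj, if_neg hj]
  | succ d ih =>
    intro lo hi hd hhi idxs ans j
    by_cases hlh : lo ≥ hi
    · -- leaf again (interval already empty)
      rw [pvSolve, if_pos hlh, pvSolve]
      rw [pv_scatter_get (fun i => if lo == n1
          || PySem.List.pyGetD s (lo : Int) 0 > PySem.List.pyGetD queries (i : Int) 0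
        then (lo : Int) - 1 else (lo : Int)) idxs ans j]
      by_cases hj : j ∈ idxs ∧ j < ans.length
      · rw [if_pos hj, if_pos hj]
        rw [pvBis, dif_neg (by omega)]
        rfl
      · rw [if_neg hj, if_neg hj]
    · rw [pvSolve, if_neg hlh]
      have hmidlt : (lo + hi) / 2 < hi := by omega
      have hlomid : lo ≤ (lo + hi) / 2 := by omega
      set mid := (lo + hi) / 2 with hmid
      set c : Nat → Bool := fun i =>
        decide (PySem.List.pyGetD s (mid : Int) 0 < PySem.List.pyGetD queries (i : Int) 0)
        with hc
      have hpart : idxs.foldl (fun (lr : List Nat × List Nat) (i : Nat) =>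
          if PySem.List.pyGetD s (mid : Int) 0 < PySem.List.pyGetD queries (i : Int) 0
          then (lr.1, lr.2 ++ [i]) else (lr.1 ++ [i], lr.2)) (([], []) : List Nat × List Nat)
          = (idxs.filter (fun i => ! c i), idxs.filter c) := by
        rw [← pv_partition c idxs]
        simp [hc]
      rw [hpart]
      rw [show ([(lo, mid, idxs.filter (fun i => ! c i)), (mid + 1, hi, idxs.filter c)]
            : List (Nat × Nat × List Nat))
          = [(lo, mid, idxs.filter (fun i => ! c i))] ++ [(mid + 1, hi, idxs.filter c)]
        from rfl]
      rw [pvSolve_append s queries n1 (pvM [(lo, mid, idxs.filter (fun i => ! c i))]) _ _ _ (le_refl _)]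
      have hlen1 : (pvSolve s queries n1 [(lo, mid, idxs.filter (fun i => ! c i))] ans).length
          = ans.length := pvSolve_len s queries n1 _ _ _ (le_refl _)
      rw [ih (mid + 1) hi (by omega) hhi _ _ j, hlen1,
        ih lo mid (by omega) (by omega) _ _ j]
      -- now a case analysis on membership and the comparison at mid
      by_cases hj : j < ans.length
      · by_cases hmem : j ∈ idxs
        · by_cases hcj : c j = true
          · have hr : j ∈ idxs.filter c := List.mem_filter.2 ⟨hmem, hcj⟩
            rw [if_pos ⟨hr, hj⟩, if_pos ⟨hmem, hj⟩]
            have hcmp : PySem.List.pyGetD s ((mid : Nat) : Int) 0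
                < PySem.List.pyGetD queries (j : Int) 0 := by
              have h' := hcj; rw [hc] at h'; exact of_decide_eq_true h'
            have : pvBis s (PySem.List.pyGetD queries (j : Int) 0) lo hi
                = pvBis s (PySem.List.pyGetD queries (j : Int) 0) (mid + 1) hi := by
              rw [pvBis, dif_pos (by omega), ← hmid, if_pos hcmp]
            rw [this]
          · have hncj : c j = false := by simpa using hcj
            have hr : j ∉ idxs.filter c := by
              intro hin
              exact hcj (List.mem_filter.1 hin).2
            have hl : j ∈ idxs.filter (fun i => ! c i) :=
              List.mem_filter.2 ⟨hmem, by simp [hncj]⟩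
            rw [if_neg (fun h => hr h.1), if_pos ⟨hl, hj⟩, if_pos ⟨hmem, hj⟩]
            have hncmp : ¬ (PySem.List.pyGetD s ((mid : Nat) : Int) 0
                < PySem.List.pyGetD queries (j : Int) 0) := by
              have h' := hncj; rw [hc] at h'; exact of_decide_eq_false h'
            have : pvBis s (PySem.List.pyGetD queries (j : Int) 0) lo hi
                = pvBis s (PySem.List.pyGetD queries (j : Int) 0) lo mid := by
              rw [pvBis, dif_pos (by omega), ← hmid, if_neg hncmp]
            rw [this]
        · have h1 : j ∉ idxs.filter c := fun h => hmem (List.mem_filter.1 h).1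
          have h2 : j ∉ idxs.filter (fun i => ! c i) := fun h => hmem (List.mem_filter.1 h).1
          rw [if_neg (fun h => h1 h.1), if_neg (fun h => h2 h.1), if_neg (fun h => hmem h.1)]
      · rw [if_neg (fun h => hj h.2), if_neg (fun h => hj h.2), if_neg (fun h => hj h.2)]

-- ===== VERDICT (by name: the statement is the Claim_ definition above) =====
theorem answerQueries_spec : Claim_equal_answerQueries := by
  intro nums queries _
  unfold Spec_answerQueries
  simp only [answerQueries, answerQueries_alt]
  rw [pv_buildA, pv_buildB0]
  set m := PySem.List.sorted nums (fun x => x) false with hm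
  set P := pvPfx m 0 with hP
  rw [PySem.List.foldl_append_singleton_eq_map, List.nil_append]
  have hn1 : ((P.length : Nat) : Int) = PySem.List.len m + 1 := by
    rw [hP, pvPfx_length, PySem.List.len_eq]; push_cast; ring
  have hmap : queries.map (fun q =>
        if ((PySem.List.bisectLeft P q : Int)) == PySem.List.len m + 1
            || PySem.List.pyGetD P (PySem.List.bisectLeft P q : Int) 0 > q
          then (PySem.List.bisectLeft P q : Int) - 1
          else (PySem.List.bisectLeft P q : Int))
      = queries.map (fun q => pvV P P.length (PySem.List.bisectLeft P q) q) := by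
    apply List.map_congr_left
    intro q _
    exact pv_fA_eq P (PySem.List.len m) hn1 q
  rw [hmap]
  have hlen0 : (PySem.List.pyRepeat [(0:Int)] (PySem.List.len queries)).length
      = queries.length := by
    simp [PySem.List.pyRepeat_singleton, PySem.List.len_eq]
  apply List.ext_getElem?
  intro j
  rw [pvSolve_one_get P queries P.length P.length 0 P.length (by omega) (le_refl _)
    (List.range queries.length) _ j]
  by_cases hj : j < queries.length
  · rw [if_pos ⟨List.mem_range.2 hj, by omega⟩]
    rw [List.getElem?_map, List.getElem?_eq_getElem hj]
    simp only [Option.map_some]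
    congr 1
    rw [← pv_bisect_eq_pvBis]
    congr 1 <;> rw [PySem.List.pyGetD_natCast, List.getD_eq_getElem _ _ hj]
  · rw [if_neg (fun h => hj (List.mem_range.1 h.1)), List.getElem?_map]
    have h1 : queries[j]? = none := by rw [List.getElem?_eq_none]; omega
    have h2 : (PySem.List.pyRepeat [(0:Int)] (PySem.List.len queries))[j]? = none := by
      rw [List.getElem?_eq_none]; omega
    rw [h1, h2]; rfl
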